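-- pv_equiv track=rewrite | github.com/Huhender/test | test.py | min_kolon
-- ===== SOURCE A (Python) =====
-- def min_kolon(y):
--
--    summ = list(map(sum, zip(*y)))
--    mx = min(summ)
--    index = 0
--    for i in range(len(summ)):
--       if mx == summ[i]:
--          index = i
--
--    return index
-- ===== SOURCE B (Python) =====
-- def min_kolon(y):
--     best = None
--     index = 0
--     for i, col in enumerate(zip(*y)):
--         s = sum(col)
--         if best is None or s <= best:
--             best = s
--             index = i
--     if best is None:
--         raise ValueError("min() arg is an empty sequence")
--     return index
-- ===== Notes on version B (the rewrite author's own statement) =====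
-- stated objective: alternative
-- what changed: Single streaming pass over the columns keeping a running (best_sum, index) with <= so the last minimal column wins, instead of materializing the list of column sums, taking min, and re-scanning it for the last match.
-- outside the precondition, e.g. on min_kolon([]): A raises ValueError, B raises ValueError; on min_kolon([[]]): A raises ValueError, B raises ValueError
import Mathlib
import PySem

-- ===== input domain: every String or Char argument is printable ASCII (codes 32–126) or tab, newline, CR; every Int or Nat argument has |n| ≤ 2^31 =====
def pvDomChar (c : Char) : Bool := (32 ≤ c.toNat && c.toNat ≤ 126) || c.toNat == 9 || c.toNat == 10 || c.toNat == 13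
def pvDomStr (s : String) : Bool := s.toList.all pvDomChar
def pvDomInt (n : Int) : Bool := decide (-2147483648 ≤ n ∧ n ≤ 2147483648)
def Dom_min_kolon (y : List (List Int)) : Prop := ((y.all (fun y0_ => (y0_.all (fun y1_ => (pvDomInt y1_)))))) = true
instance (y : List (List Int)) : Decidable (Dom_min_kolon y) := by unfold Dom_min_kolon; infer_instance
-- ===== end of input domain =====

-- B replaces A's materialize-sums / min / rescan-for-last-match with one streaming pass
-- keeping a running (best_sum, index); same value everywhere both return (alternative decomposition).

-- shared faithful helper for Python's zip(*y): the list of columns (length = min row length)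
def pvMinLen : List (List Int) → Nat
  | [] => 0
  | r :: rs => rs.foldl (fun m t => min m t.length) r.length

def pvCols (y : List (List Int)) : List (List Int) :=
  (List.range (pvMinLen y)).map (fun i => y.map (fun r => r.getD i 0))

-- ===== PORT A =====
def min_kolon (y : List (List Int)) : Int :=
  let summ := (pvCols y).map (fun c => c.sum)
  let mx := (PySem.List.min? summ (fun x => x)).getD 0
  (List.range summ.length).foldl
    (fun index i => if mx = summ.getD i 0 then (i : Int) else index) 0

-- ===== PORT B =====
def min_kolon_alt (y : List (List Int)) : Int :=
  let st := (PySem.List.enumerate (pvCols y)).foldl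
    (fun (st : Option Int × Int) (p : Int × List Int) =>
      let s := p.2.sum
      match st.1 with
      | none => (some s, p.1)
      | some b => if s ≤ b then (some s, p.1) else st)
    (none, 0)
  st.2

-- ===== PRECONDITION & SPEC =====
-- Pre_ excludes exactly the inputs with no columns (empty y or a row that is empty),
-- on which Python A raises ValueError from min([]) (B raises ValueError there too).
def Pre_min_kolon (y : List (List Int)) : Prop := y ≠ [] ∧ ∀ r ∈ y, r ≠ []
instance (y : List (List Int)) : Decidable (Pre_min_kolon y) := by unfold Pre_min_kolon; infer_instance
def pvWitness_min_kolon : List (List Int) := [[1, 2], [3, 0]]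

def Spec_min_kolon (y : List (List Int)) (out : Int) : Prop := out = min_kolon_alt y
instance (y : List (List Int)) (out : Int) : Decidable (Spec_min_kolon y out) := by unfold Spec_min_kolon; infer_instance

-- ===== CLAIM (what is proved, stated in full; the proofs are below) =====
def Claim_equal_min_kolon : Prop := ∀ (y : List (List Int)), Dom_min_kolon y → Pre_min_kolon y → Spec_min_kolon y (min_kolon y)

-- ===== LEMMAS AND PROOFS =====

-- abbreviations for the two folds, over an arbitrary list of column sums
def pvAF (s : List Int) (mx : Int) : Int :=
  (List.range s.length).foldl (fun index i => if mx = s.getD i 0 then (i : Int) else index) 0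

def pvStep (st : Option Int × Int) (p : Int × Int) : Option Int × Int :=
  match st.1 with
  | none => (some p.2, p.1)
  | some b => if p.2 ≤ b then (some p.2, p.1) else st

def pvBF (s : List Int) : Option Int × Int := (PySem.List.enumerate s).foldl pvStep (none, 0)

def pvMin (s : List Int) : Int := ((PySem.List.min? s (fun x => x)).getD 0)

theorem pv_enumerate_map {α β : Type} (g : α → β) (xs : List α) (n : Int) :
    PySem.List.enumerate (xs.map g) n = (PySem.List.enumerate xs n).map (fun p => (p.1, g p.2)) := by
  induction xs generalizing n with
  | nil => simp [PySem.List.enumerate_nil]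
  | cons x t ih => simp [PySem.List.enumerate_cons, ih]

theorem pv_min_append (x : Int) (r : List Int) (a : Int) :
    pvMin (x :: r ++ [a]) = min (pvMin (x :: r)) a := by
  simp [pvMin, PySem.List.min?_id_cons, List.foldl_append]

theorem pv_AF_append (t : List Int) (a mx : Int) :
    pvAF (t ++ [a]) mx =
      (if mx = a then (t.length : Int) else pvAF t mx) := by
  unfold pvAF
  rw [show (t ++ [a]).length = t.length + 1 by simp, List.range_succ, List.foldl_append]
  have h1 : (List.range t.length).foldl
      (fun index i => if mx = (t ++ [a]).getD i 0 then (i : Int) else index) 0 =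
      (List.range t.length).foldl
      (fun index i => if mx = t.getD i 0 then (i : Int) else index) 0 := by
    apply PySem.List.foldl_congr_mem
    intro acc i hi
    have hlt : i < t.length := List.mem_range.mp hi
    have : (t ++ [a]).getD i 0 = t.getD i 0 := by
      simp [List.getD, List.getElem?_append_left hlt]
    rw [this]
  rw [h1]
  simp

theorem pv_main (s : List Int) (hs : s ≠ []) :
    pvBF s = (some (pvMin s), pvAF s (pvMin s)) := by
  induction s using List.reverseRecOn with
  | nil => exact absurd rfl hs
  | append_singleton t a ih =>
    rcases t with _ | ⟨x, r⟩
    · -- single element [a]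
      simp [pvBF, PySem.List.enumerate_cons, PySem.List.enumerate_nil, pvStep, pvMin,
        PySem.List.min?_id_cons, pvAF, List.range_succ]
    · -- t = x :: r nonempty
      have ih' := ih (by simp)
      have hen : PySem.List.enumerate ((x :: r) ++ [a]) 0 =
          PySem.List.enumerate (x :: r) 0 ++ [(((x :: r).length : Int), a)] := by
        rw [PySem.List.enumerate_append]
        simp [PySem.List.enumerate_cons, PySem.List.enumerate_nil]
      have hbf : pvBF ((x :: r) ++ [a]) = pvStep (pvBF (x :: r)) (((x :: r).length : Int), a) := by
        unfold pvBF
        rw [hen, List.foldl_append]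
        simp
      rw [hbf, ih', pv_min_append, pv_AF_append]
      by_cases hle : a ≤ pvMin (x :: r)
      · have hmin : min (pvMin (x :: r)) a = a := by omega
        simp [pvStep, hle]
      · have hlt : pvMin (x :: r) < a := by omega
        have hmin : min (pvMin (x :: r)) a = pvMin (x :: r) := by omega
        have hne : ¬ (pvMin (x :: r) = a) := by omega
        simp [pvStep, hle, hmin, hne]

theorem pv_minLen_pos (y : List (List Int)) (h : Pre_min_kolon y) : 0 < pvMinLen y := by
  obtain ⟨hne, hall⟩ := h
  rcases y with _ | ⟨r, rs⟩
  · exact absurd rfl hne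
  · unfold pvMinLen
    have hr : 0 < r.length := List.length_pos_iff.mpr (hall r (by simp))
    have hrs : ∀ t ∈ rs, 0 < t.length := fun t ht =>
      List.length_pos_iff.mpr (hall t (by simp [ht]))
    clear hall hne
    induction rs generalizing r with
    | nil => simpa using hr
    | cons t ts ih =>
      have ht : 0 < t.length := hrs t (by simp)
      simp only [List.foldl_cons]
      -- accumulator min r.length t.length: feed a fake row of that length
      have := ih (List.replicate (min r.length t.length) 0)
        (by simp; omega) (fun u hu => hrs u (by simp [hu]))
      simpa using this

-- ===== VERDICT (by name: the statement is the Claim_ definition above) =====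
theorem min_kolon_spec : Claim_equal_min_kolon := by
  intro y _ hpre
  unfold Spec_min_kolon min_kolon min_kolon_alt
  set s : List Int := (pvCols y).map (fun c => c.sum) with hsdef
  have hs : s ≠ [] := by
    have := pv_minLen_pos y hpre
    simp [hsdef, pvCols]
    omega
  have halt : (PySem.List.enumerate (pvCols y)).foldl
      (fun (st : Option Int × Int) (p : Int × List Int) =>
        let sm := p.2.sum
        match st.1 with
        | none => (some sm, p.1)
        | some b => if sm ≤ b then (some sm, p.1) else st)
      (none, 0) = pvBF s := by
    unfold pvBF
    rw [hsdef, pv_enumerate_map, List.foldl_map]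
    rfl
  simp only [halt, pv_main s hs]
  rfl
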